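-- pv_equiv track=rewrite | github.com/chrisjune/codility_lessons | ex_4_1_swap_slow_soution.py | solution
-- ===== SOURCE A (Python) =====
-- def solution(A, B):
--     sum_a = sum(A)
--     sum_b = sum(B)
--     for i in range(len(A)):
--         for j in range(len(B)):
--             a = A[i]
--             b = B[j]
--             sum_a = sum_a - a + b
--             sum_b = sum_b - b + a
--             if sum_a == sum_b:
--                 return True
--             sum_a = sum_a - b + a
--             sum_b = sum_b - a + b
--     return False
-- ===== SOURCE B (Python) =====
-- def solution(A, B):
--     d = sum(A) - sum(B)
--     if d % 2 != 0:
--         return False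
--     need = d // 2
--     bset = set(B)
--     return any(a - need in bset for a in A)
-- ===== Notes on version B (the rewrite author's own statement) =====
-- stated objective: faster
-- what changed: replaced the nested scan over all (i,j) pairs by computing the required difference (sum(A)-sum(B))/2 once, building a hash set of B, and a single scan of A
import Mathlib
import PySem

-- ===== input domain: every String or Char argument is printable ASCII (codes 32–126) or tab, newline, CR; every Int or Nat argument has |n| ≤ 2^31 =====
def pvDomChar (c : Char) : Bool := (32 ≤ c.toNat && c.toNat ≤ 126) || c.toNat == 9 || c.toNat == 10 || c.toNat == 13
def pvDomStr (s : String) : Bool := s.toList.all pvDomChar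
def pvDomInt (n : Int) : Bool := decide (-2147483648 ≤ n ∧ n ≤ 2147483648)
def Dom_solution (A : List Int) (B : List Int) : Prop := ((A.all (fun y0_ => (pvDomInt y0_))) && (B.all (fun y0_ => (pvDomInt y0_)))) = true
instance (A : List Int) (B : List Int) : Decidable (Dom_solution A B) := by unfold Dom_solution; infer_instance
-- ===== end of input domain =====

-- B replaces A's O(n*m) nested pair scan by the required half-difference and a set lookup (faster).

-- ===== PORT A =====
-- inner loop over B: mutates sum_a/sum_b, tests, restores; threads the state like the Python
def solInner (a : Int) (sa sb : Int) : List Int → (Bool × Int × Int)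
  | [] => (false, sa, sb)
  | b :: bs =>
    let sa1 := sa - a + b
    let sb1 := sb - b + a
    if sa1 = sb1 then (true, sa1, sb1)
    else solInner a (sa1 - b + a) (sb1 - a + b) bs

-- outer loop over A
def solOuter (B : List Int) (sa sb : Int) : List Int → Bool
  | [] => false
  | a :: as =>
    let r := solInner a sa sb B
    if r.1 then true else solOuter B r.2.1 r.2.2 as

def solution (A : List Int) (B : List Int) : Bool :=
  solOuter B A.sum B.sum A

-- ===== PORT B =====
def solution_alt (A : List Int) (B : List Int) : Bool :=
  let d := A.sum - B.sum
  if PySem.Int.mod d 2 ≠ 0 then false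
  else
    let need := PySem.Int.floordiv d 2
    let bset : PySem.Set Int := PySem.Set.ofList B
    A.any (fun a => PySem.Set.contains bset (a - need))

-- ===== PRECONDITION & SPEC =====
def Spec_solution (A : List Int) (B : List Int) (out : Bool) : Prop := out = solution_alt A B
instance (A : List Int) (B : List Int) (out : Bool) : Decidable (Spec_solution A B out) := by unfold Spec_solution; infer_instance

-- ===== CLAIM (what is proved, stated in full; the proofs are below) =====
def Claim_equal_solution : Prop := ∀ (A : List Int) (B : List Int), Dom_solution A B → Spec_solution A B (solution A B)

-- ===== LEMMAS AND PROOFS =====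

theorem solInner_fst (a sa sb : Int) (bs : List Int) :
    (solInner a sa sb bs).1 = bs.any (fun b => decide (sa - a + b = sb - b + a)) := by
  induction bs with
  | nil => simp [solInner]
  | cons b bs ih =>
    simp only [solInner, List.any_cons]
    split_ifs with h
    · simp [h]
    · have e1 : sa - a + b - b + a = sa := by ring
      have e2 : sb - b + a - a + b = sb := by ring
      rw [e1, e2, ih]
      simp [h]

theorem solInner_restore (a sa sb : Int) (bs : List Int) (h : (solInner a sa sb bs).1 = false) :
    (solInner a sa sb bs).2 = (sa, sb) := by
  induction bs generalizing sa sb with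
  | nil => simp [solInner]
  | cons b bs ih =>
    simp only [solInner] at h ⊢
    by_cases hc : sa - a + b = sb - b + a
    · simp [hc] at h
    · simp only [hc, if_false] at h ⊢
      have e1 : sa - a + b - b + a = sa := by ring
      have e2 : sb - b + a - a + b = sb := by ring
      rw [e1, e2] at h ⊢
      exact ih _ _ h

theorem solOuter_eq (B : List Int) (sa sb : Int) (as : List Int) :
    solOuter B sa sb as =
      as.any (fun a => B.any (fun b => decide (sa - a + b = sb - b + a))) := by
  induction as with
  | nil => simp [solOuter]
  | cons a as ih =>
    simp only [solOuter, List.any_cons]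
    by_cases h : (solInner a sa sb B).1 = true
    · rw [h]
      rw [solInner_fst] at h
      simp [h]
    · have hf : (solInner a sa sb B).1 = false := by
        cases hx : (solInner a sa sb B).1 <;> simp_all
      rw [hf]
      have hr := solInner_restore a sa sb B hf
      rw [solInner_fst] at hf
      simp only [hr] at *
      simp [hf, ih]

-- pointwise arithmetic: the swap condition vs. the half-difference lookup
theorem swap_cond_iff (sa sb a b : Int) :
    (sa - a + b = sb - b + a) ↔
      (PySem.Int.mod (sa - sb) 2 = 0 ∧ b = a - PySem.Int.floordiv (sa - sb) 2) := by
  rw [PySem.Int.mod_eq_emod_of_pos (by norm_num), PySem.Int.floordiv_eq_ediv_of_pos (by norm_num)]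
  omega

theorem solution_eq_alt (A B : List Int) : solution A B = solution_alt A B := by
  unfold solution solution_alt
  rw [solOuter_eq]
  set sa := A.sum
  set sb := B.sum
  rw [Bool.eq_iff_iff]
  simp only [List.any_eq_true, decide_eq_true_eq, PySem.Set.contains_eq_listContains,
    List.contains_eq_mem, PySem.Set.mem_ofList, ne_eq, ite_not, ite_eq_iff, Bool.false_eq_true,
    and_false, or_false]
  constructor
  · rintro ⟨a, ha, b, hb, hab⟩
    have h := (swap_cond_iff sa sb a b).1 hab
    exact ⟨h.1, a, ha, h.2 ▸ hb⟩
  · rintro ⟨hd, a, ha, hb⟩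
    exact ⟨a, ha, _, hb, (swap_cond_iff sa sb a _).2 ⟨hd, rfl⟩⟩

-- ===== VERDICT (by name: the statement is the Claim_ definition above) =====
theorem solution_spec : Claim_equal_solution := by
  intro A B _
  exact solution_eq_alt A B
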